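-- pv_equiv track=rewrite | github.com/iudicio/SantiWayWEB | microservices/anomaly_detection/backend/routes/analyze.py | normalize_detection_types
-- ===== SOURCE A (Python) =====
-- from typing import Optional, List, Dict, Any
--
-- def normalize_detection_types(detection_types: List[str]) -> Dict[str, bool]:
--     """
--     Нормализация типов детекции для совместимости frontend/backend
--
--     Маппинг frontend -> backend:
--     - density_cluster -> density
--     - density_spike -> density
--     - night_activity -> time
--     - following -> personal
--     - stationary_surveillance -> stationary
--     - personal_deviation -> personal
--     """
--     normalized = {
--         "density": False,
--         "time": False,
--         "stationary": False,
--         "personal": False,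
--     }
--
--     type_mapping = {
--         "density_cluster": "density",
--         "density_spike": "density",
--         "night_activity": "time",
--         "following": "personal",
--         "stationary_surveillance": "stationary",
--         "personal_deviation": "personal",
--         "density": "density",
--         "time": "time",
--         "stationary": "stationary",
--         "personal": "personal",
--     }
--
--     for dt in detection_types:
--         backend_type = type_mapping.get(dt)
--         if backend_type:
--             normalized[backend_type] = True
--
--     return normalized
-- ===== SOURCE B (Python) =====
-- def normalize_detection_types(detection_types):
--     groups = [
--         ("density", ("density_cluster", "density_spike", "density")),
--         ("time", ("night_activity", "time")),
--         ("stationary", ("stationary_surveillance", "stationary")),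
--         ("personal", ("following", "personal_deviation", "personal")),
--     ]
--     return {key: any(dt in group for dt in detection_types)
--             for key, group in groups}
-- ===== Notes on version B (the rewrite author's own statement) =====
-- stated objective: alternative
-- what changed: B inverts the traversal: instead of one pass over the input with a forward lookup updating a mutable dict, it iterates over the four backend categories and computes each flag as any() membership of the input in that category's reverse group.
import Mathlib
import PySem

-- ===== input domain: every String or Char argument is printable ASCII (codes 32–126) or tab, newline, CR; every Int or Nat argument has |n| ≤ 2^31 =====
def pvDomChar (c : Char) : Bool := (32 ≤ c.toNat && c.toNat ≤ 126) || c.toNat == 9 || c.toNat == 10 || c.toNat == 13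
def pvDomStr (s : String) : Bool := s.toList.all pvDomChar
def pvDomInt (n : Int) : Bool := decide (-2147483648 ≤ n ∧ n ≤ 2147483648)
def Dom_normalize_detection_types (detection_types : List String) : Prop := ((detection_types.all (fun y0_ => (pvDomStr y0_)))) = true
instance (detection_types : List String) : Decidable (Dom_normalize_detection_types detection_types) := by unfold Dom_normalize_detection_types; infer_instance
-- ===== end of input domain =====

-- B inverts A's traversal (outer loop over the four backend categories, any()-membership inner test) instead of A's per-element forward lookup into a mutable dict; same O(n) cost.

-- ===== PORT A =====
def pvTypeMapping : PySem.Dict String String := PySem.Dict.ofList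
  [("density_cluster", "density"), ("density_spike", "density"),
   ("night_activity", "time"), ("following", "personal"),
   ("stationary_surveillance", "stationary"), ("personal_deviation", "personal"),
   ("density", "density"), ("time", "time"),
   ("stationary", "stationary"), ("personal", "personal")]

def normalize_detection_types (detection_types : List String) : List (String × Bool) :=
  (detection_types.foldl
    (fun normalized dt =>
      match pvTypeMapping.get? dt with
      | some backend_type =>
          -- `if backend_type:` — truthy = non-empty string
          if backend_type == "" then normalized else normalized.insert backend_type true
      | none => normalized)
    (PySem.Dict.ofList
      [("density", false), ("time", false), ("stationary", false), ("personal", false)])).items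

-- ===== PORT B =====
def pvGroups : List (String × List String) :=
  [("density", ["density_cluster", "density_spike", "density"]),
   ("time", ["night_activity", "time"]),
   ("stationary", ["stationary_surveillance", "stationary"]),
   ("personal", ["following", "personal_deviation", "personal"])]

def normalize_detection_types_alt (detection_types : List String) : List (String × Bool) :=
  pvGroups.map (fun kg => (kg.1, detection_types.any (fun dt => kg.2.contains dt)))

-- ===== PRECONDITION & SPEC =====
def Spec_normalize_detection_types (detection_types : List String) (out : List (String × Bool)) : Prop := out = normalize_detection_types_alt detection_types
instance (detection_types : List String) (out : List (String × Bool)) : Decidable (Spec_normalize_detection_types detection_types out) := by unfold Spec_normalize_detection_types; infer_instance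

-- ===== CLAIM (what is proved, stated in full; the proofs are below) =====
def Claim_equal_normalize_detection_types : Prop := ∀ (detection_types : List String), Dom_normalize_detection_types detection_types → Spec_normalize_detection_types detection_types (normalize_detection_types detection_types)

-- ===== LEMMAS AND PROOFS =====

def pvState (b1 b2 b3 b4 : Bool) : PySem.Dict String Bool :=
  PySem.Dict.mk [("density", b1), ("time", b2), ("stationary", b3), ("personal", b4)]

lemma pv_map_eq : pvTypeMapping = PySem.Dict.mk
    [("density_cluster", "density"), ("density_spike", "density"),
     ("night_activity", "time"), ("following", "personal"),
     ("stationary_surveillance", "stationary"), ("personal_deviation", "personal"),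
     ("density", "density"), ("time", "time"),
     ("stationary", "stationary"), ("personal", "personal")] := by decide

lemma pv_init_eq :
    PySem.Dict.ofList [("density", false), ("time", false), ("stationary", false), ("personal", false)]
      = pvState false false false false := by decide

lemma pv_step (b1 b2 b3 b4 : Bool) (x : String) :
    (match pvTypeMapping.get? x with
      | some bt => if bt == "" then pvState b1 b2 b3 b4 else (pvState b1 b2 b3 b4).insert bt true
      | none => pvState b1 b2 b3 b4)
    = pvState (b1 || ["density_cluster", "density_spike", "density"].contains x)
              (b2 || ["night_activity", "time"].contains x)
              (b3 || ["stationary_surveillance", "stationary"].contains x)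
              (b4 || ["following", "personal_deviation", "personal"].contains x) := by
  rw [pv_map_eq]
  simp only [pvState, PySem.Dict.get?, List.contains_cons, List.contains_nil]
  by_cases h1 : x = "density_cluster" <;> by_cases h2 : x = "density_spike" <;>
    by_cases h3 : x = "night_activity" <;> by_cases h4 : x = "following" <;>
    by_cases h5 : x = "stationary_surveillance" <;> by_cases h6 : x = "personal_deviation" <;>
    by_cases h7 : x = "density" <;> by_cases h8 : x = "time" <;>
    by_cases h9 : x = "stationary" <;> by_cases h10 : x = "personal" <;>
    first
    | (simp_all [PySem.Dict.insert, PySem.Dict.ext_iff]; done)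
    | (simp [List.find?,
        beq_eq_false_iff_ne.mpr (Ne.symm h1), beq_eq_false_iff_ne.mpr (Ne.symm h2),
        beq_eq_false_iff_ne.mpr (Ne.symm h3), beq_eq_false_iff_ne.mpr (Ne.symm h4),
        beq_eq_false_iff_ne.mpr (Ne.symm h5), beq_eq_false_iff_ne.mpr (Ne.symm h6),
        beq_eq_false_iff_ne.mpr (Ne.symm h7), beq_eq_false_iff_ne.mpr (Ne.symm h8),
        beq_eq_false_iff_ne.mpr (Ne.symm h9), beq_eq_false_iff_ne.mpr (Ne.symm h10),
        beq_eq_false_iff_ne.mpr h1, beq_eq_false_iff_ne.mpr h2,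
        beq_eq_false_iff_ne.mpr h3, beq_eq_false_iff_ne.mpr h4,
        beq_eq_false_iff_ne.mpr h5, beq_eq_false_iff_ne.mpr h6,
        beq_eq_false_iff_ne.mpr h7, beq_eq_false_iff_ne.mpr h8,
        beq_eq_false_iff_ne.mpr h9, beq_eq_false_iff_ne.mpr h10])

lemma pv_fold (xs : List String) (b1 b2 b3 b4 : Bool) :
    xs.foldl
      (fun normalized dt =>
        match pvTypeMapping.get? dt with
        | some bt => if bt == "" then normalized else normalized.insert bt true
        | none => normalized)
      (pvState b1 b2 b3 b4)
    = pvState (b1 || xs.any (fun dt => ["density_cluster", "density_spike", "density"].contains dt))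
              (b2 || xs.any (fun dt => ["night_activity", "time"].contains dt))
              (b3 || xs.any (fun dt => ["stationary_surveillance", "stationary"].contains dt))
              (b4 || xs.any (fun dt => ["following", "personal_deviation", "personal"].contains dt)) := by
  induction xs generalizing b1 b2 b3 b4 with
  | nil => simp
  | cons x xs ih =>
      simp only [List.foldl_cons, pv_step, ih, List.any_cons]
      congr 1 <;> simp [Bool.or_assoc]

-- ===== VERDICT (by name: the statement is the Claim_ definition above) =====
theorem normalize_detection_types_spec : Claim_equal_normalize_detection_types := by
  intro xs _
  show _ = _
  simp only [normalize_detection_types, pv_init_eq, pv_fold]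
  simp [normalize_detection_types_alt, pvGroups, pvState]
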